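-- pv_equiv track=rewrite | github.com/Ho3eintaji/HEEPtimize | scripts/eve/tilings.py | get_max_tile_sizes_when_i_want_seperately
-- ===== SOURCE A (Python) =====
-- def get_max_tile_sizes_when_i_want_seperately(ra, ca, cb, memory_limit_bytes, bytes_per_element):
--     max_tile_ra = ra
--     max_tile_cb = cb
--
--     # Find max_tile_ra
--     for tile_ra_candidate in range(ra, 0, -1):
--         size_a = tile_ra_candidate * ca * bytes_per_element
--         size_c = tile_ra_candidate * cb * bytes_per_element
--         if size_a + size_c <= memory_limit_bytes:
--             max_tile_ra = tile_ra_candidate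
--             break
--
--     # Find max_tile_cb
--     for tile_cb_candidate in range(cb, 0, -1):
--         size_b = ca * tile_cb_candidate * bytes_per_element
--         size_c = max_tile_ra * tile_cb_candidate * bytes_per_element
--         if size_b + size_c <= memory_limit_bytes:
--             max_tile_cb = tile_cb_candidate
--             break
--
--     return max_tile_ra, max_tile_cb
-- ===== SOURCE B (Python) =====
-- def get_max_tile_sizes_when_i_want_seperately(ra, ca, cb, memory_limit_bytes, bytes_per_element):
--     def best(n, per_unit_bytes):
--         # Largest t in 1..n with t*per_unit_bytes <= memory_limit_bytes,
--         # computed in O(1); defaults to n when no such t exists or n <= 0.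
--         if n <= 0 or per_unit_bytes <= 0:
--             return n
--         q = memory_limit_bytes // per_unit_bytes
--         return min(n, q) if q >= 1 else n
--
--     max_tile_ra = best(ra, (ca + cb) * bytes_per_element)
--     max_tile_cb = best(cb, (ca + max_tile_ra) * bytes_per_element)
--     return max_tile_ra, max_tile_cb
-- ===== Notes on version B (the rewrite author's own statement) =====
-- stated objective: faster
-- what changed: Replaces the two descending linear searches over range(n,0,-1) with closed-form floor division (limit // per-tile-byte-cost), capped at the dimension and falling back to the dimension when no tile fits or the cost is non-positive.
import Mathlib
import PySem

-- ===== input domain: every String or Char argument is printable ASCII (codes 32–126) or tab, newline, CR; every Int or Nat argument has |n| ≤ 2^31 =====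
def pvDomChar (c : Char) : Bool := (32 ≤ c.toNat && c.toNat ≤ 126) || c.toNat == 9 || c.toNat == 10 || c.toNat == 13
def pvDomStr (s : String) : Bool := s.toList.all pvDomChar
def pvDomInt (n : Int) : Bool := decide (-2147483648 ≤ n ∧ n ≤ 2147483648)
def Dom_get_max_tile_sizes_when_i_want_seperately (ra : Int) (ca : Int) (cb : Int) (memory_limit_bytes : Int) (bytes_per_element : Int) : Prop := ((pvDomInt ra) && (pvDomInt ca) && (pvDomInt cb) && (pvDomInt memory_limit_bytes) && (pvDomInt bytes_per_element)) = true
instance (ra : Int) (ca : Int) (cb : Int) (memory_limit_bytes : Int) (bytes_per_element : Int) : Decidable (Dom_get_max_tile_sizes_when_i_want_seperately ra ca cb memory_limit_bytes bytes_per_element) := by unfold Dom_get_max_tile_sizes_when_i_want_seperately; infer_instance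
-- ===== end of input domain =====

-- B replaces A's two descending linear searches by closed-form floor division (O(1) vs O(ra+cb)).
-- A returns a 2-tuple; per the type convention it is rendered as a 2-element List Int.

-- ===== PORT A =====
-- for t in range(n, 0, -1): if p t: return t   (break assigning t); default if no hit
def pvFirstHit (cands : List Int) (p : Int → Bool) (dflt : Int) : Int :=
  match cands with
  | [] => dflt
  | t :: rest => if p t then t else pvFirstHit rest p dflt

def get_max_tile_sizes_when_i_want_seperately (ra : Int) (ca : Int) (cb : Int) (memory_limit_bytes : Int) (bytes_per_element : Int) : List Int :=
  -- max_tile_ra = ra; for tile_ra_candidate in range(ra, 0, -1): … break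
  let max_tile_ra :=
    pvFirstHit (PySem.List.pyRange ra 0 (-1))
      (fun t =>
        let size_a := t * ca * bytes_per_element
        let size_c := t * cb * bytes_per_element
        decide (size_a + size_c ≤ memory_limit_bytes)) ra
  -- max_tile_cb = cb; for tile_cb_candidate in range(cb, 0, -1): … break
  let max_tile_cb :=
    pvFirstHit (PySem.List.pyRange cb 0 (-1))
      (fun t =>
        let size_b := ca * t * bytes_per_element
        let size_c := max_tile_ra * t * bytes_per_element
        decide (size_b + size_c ≤ memory_limit_bytes)) cb
  [max_tile_ra, max_tile_cb]

-- ===== PORT B =====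
def pvBest (memory_limit_bytes : Int) (n : Int) (per_unit_bytes : Int) : Int :=
  if n ≤ 0 ∨ per_unit_bytes ≤ 0 then n
  else
    let q := PySem.Int.floordiv memory_limit_bytes per_unit_bytes
    if q ≥ 1 then min n q else n

def get_max_tile_sizes_when_i_want_seperately_alt (ra : Int) (ca : Int) (cb : Int) (memory_limit_bytes : Int) (bytes_per_element : Int) : List Int :=
  let max_tile_ra := pvBest memory_limit_bytes ra ((ca + cb) * bytes_per_element)
  let max_tile_cb := pvBest memory_limit_bytes cb ((ca + max_tile_ra) * bytes_per_element)
  [max_tile_ra, max_tile_cb]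

-- ===== PRECONDITION & SPEC =====
def Spec_get_max_tile_sizes_when_i_want_seperately (ra : Int) (ca : Int) (cb : Int) (memory_limit_bytes : Int) (bytes_per_element : Int) (out : List Int) : Prop := out = get_max_tile_sizes_when_i_want_seperately_alt ra ca cb memory_limit_bytes bytes_per_element
instance (ra : Int) (ca : Int) (cb : Int) (memory_limit_bytes : Int) (bytes_per_element : Int) (out : List Int) : Decidable (Spec_get_max_tile_sizes_when_i_want_seperately ra ca cb memory_limit_bytes bytes_per_element out) := by unfold Spec_get_max_tile_sizes_when_i_want_seperately; infer_instance

-- ===== CLAIM (what is proved, stated in full; the proofs are below) =====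
def Claim_equal_get_max_tile_sizes_when_i_want_seperately : Prop := ∀ (ra : Int) (ca : Int) (cb : Int) (memory_limit_bytes : Int) (bytes_per_element : Int), Dom_get_max_tile_sizes_when_i_want_seperately ra ca cb memory_limit_bytes bytes_per_element → Spec_get_max_tile_sizes_when_i_want_seperately ra ca cb memory_limit_bytes bytes_per_element (get_max_tile_sizes_when_i_want_seperately ra ca cb memory_limit_bytes bytes_per_element)

-- ===== LEMMAS AND PROOFS =====

-- pvFound: the value A's descending search returns when it breaks, None when it falls through.
def pvFound (L per n : Int) : Option Int :=
  if n ≤ 0 then none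
  else if per ≤ 0 then (if n * per ≤ L then some n else none)
  else if PySem.Int.floordiv L per ≥ 1 then some (min n (PySem.Int.floordiv L per)) else none

theorem pvFirstHit_found (L per : Int) :
    ∀ (n d : Int),
      pvFirstHit (PySem.List.pyRange n 0 (-1)) (fun t => decide (t * per ≤ L)) d
        = (pvFound L per n).getD d := by
  intro n
  induction hk : n.toNat generalizing n with
  | zero =>
    intro d
    have hn : n ≤ 0 := by omega
    rw [PySem.List.pyRange_neg_one_eq_nil hn]
    simp [pvFirstHit, pvFound, hn]
  | succ k ih =>
    intro d
    have hn : (0:Int) < n := by omega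
    rw [PySem.List.pyRange_neg_one_cons hn]
    have hrec := ih (n - 1) (by omega) d
    by_cases hper : per ≤ 0
    · by_cases hhit : n * per ≤ L
      · simp [pvFirstHit, pvFound, hn.not_ge, hper, hhit]
      · have hnone1 : pvFound L per n = none := by
          simp [pvFound, hn.not_ge, hper, hhit]
        have hnone2 : pvFound L per (n - 1) = none := by
          by_cases h1 : n - 1 ≤ 0
          · simp [pvFound, h1]
          · have : ¬ (n - 1) * per ≤ L := by nlinarith
            simp [pvFound, h1, hper, this]
        simp only [pvFirstHit, decide_eq_true_eq]
        rw [if_neg hhit, hrec, hnone1, hnone2]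
    · have hper : 0 < per := by omega
      have hbr : ∀ q : Int, q ≤ PySem.Int.floordiv L per ↔ q * per ≤ L :=
        fun q => PySem.Int.le_floordiv_iff_mul_le hper
      set Q := PySem.Int.floordiv L per with hQ
      by_cases hhit : n * per ≤ L
      · have hnQ : n ≤ Q := (hbr n).2 hhit
        have hQ1 : Q ≥ 1 := by omega
        have hmin : min n Q = n := min_eq_left hnQ
        simp [pvFirstHit, pvFound, hn.not_ge, hper.not_ge, hhit, ← hQ, hQ1, hmin]
      · have hQn : Q < n := by
          by_contra h
          exact hhit ((hbr n).1 (by omega))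
        simp only [pvFirstHit, decide_eq_true_eq]
        rw [if_neg hhit, hrec]
        by_cases hQ1 : Q ≥ 1
        · have h1 : ¬ n ≤ 0 := hn.not_ge
          have h2 : ¬ n - 1 ≤ 0 := by omega
          have hm1 : min (n-1) Q = Q := min_eq_right (by omega)
          have hm2 : min n Q = Q := min_eq_right (by omega)
          simp only [pvFound, if_neg h1, if_neg h2, if_neg hper.not_ge, ← hQ, if_pos hQ1,
            hm1, hm2]
        · by_cases h2 : n - 1 ≤ 0
          · simp [pvFound, hn.not_ge, h2, hper.not_ge, ← hQ, hQ1]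
          · simp [pvFound, hn.not_ge, h2, hper.not_ge, ← hQ, hQ1]

-- A's descending search with predicate (t*per ≤ L) and default n equals the closed form.
theorem pvFirstHit_eq_best (L per : Int) :
    ∀ (n : Int),
      pvFirstHit (PySem.List.pyRange n 0 (-1)) (fun t => decide (t * per ≤ L)) n
        = pvBest L n per := by
  intro n
  rw [pvFirstHit_found L per n n]
  unfold pvFound pvBest
  split_ifs with h1 h2 h3 h4 h5 <;> simp_all <;> omega

-- ===== VERDICT (by name: the statement is the Claim_ definition above) =====
theorem get_max_tile_sizes_when_i_want_seperately_spec : Claim_equal_get_max_tile_sizes_when_i_want_seperately := by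
  intro ra ca cb L bpe _
  unfold Spec_get_max_tile_sizes_when_i_want_seperately
  unfold get_max_tile_sizes_when_i_want_seperately get_max_tile_sizes_when_i_want_seperately_alt
  have key : ∀ (x y n : Int),
      pvFirstHit (PySem.List.pyRange n 0 (-1))
        (fun t => decide (x * t * bpe + y * t * bpe ≤ L)) n
      = pvBest L n ((x + y) * bpe) := by
    intro x y n
    rw [← pvFirstHit_eq_best L ((x + y) * bpe) n]
    congr 1
    funext t
    congr 1
    · have : t * ((x + y) * bpe) = x * t * bpe + y * t * bpe := by ring
      rw [this]
  have h1 : pvFirstHit (PySem.List.pyRange ra 0 (-1))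
      (fun t => decide (t * ca * bpe + t * cb * bpe ≤ L)) ra
      = pvBest L ra ((ca + cb) * bpe) := by
    rw [← key ca cb ra]
    congr 1
    funext t
    congr 2 <;> try ring
  simp only [h1]
  rw [key ca (pvBest L ra ((ca + cb) * bpe)) cb]
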